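-- pv_equiv track=rewrite | github.com/HSocho/Matrix_Calculator | matrix_calculator.py | is_valid_matrix
-- ===== SOURCE A (Python) =====
-- def is_valid_matrix(matrix):
--     if not matrix:
--         return False
--
--     num_columns = len(matrix[0])
--     for row in matrix:
--         if len(row) != num_columns:
--             return False
--
--     return True
-- ===== SOURCE B (Python) =====
-- def is_valid_matrix(matrix):
--     return len({len(row) for row in matrix}) == 1
-- ===== Notes on version B (the rewrite author's own statement) =====
-- stated objective: simpler
-- what changed: Replaces the explicit emptiness guard plus per-row comparison loop against the first row's length (with early exit) by building the set of distinct row lengths in one comprehension and testing that it has exactly one element (an empty matrix gives a 0-element set).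
import Mathlib
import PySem

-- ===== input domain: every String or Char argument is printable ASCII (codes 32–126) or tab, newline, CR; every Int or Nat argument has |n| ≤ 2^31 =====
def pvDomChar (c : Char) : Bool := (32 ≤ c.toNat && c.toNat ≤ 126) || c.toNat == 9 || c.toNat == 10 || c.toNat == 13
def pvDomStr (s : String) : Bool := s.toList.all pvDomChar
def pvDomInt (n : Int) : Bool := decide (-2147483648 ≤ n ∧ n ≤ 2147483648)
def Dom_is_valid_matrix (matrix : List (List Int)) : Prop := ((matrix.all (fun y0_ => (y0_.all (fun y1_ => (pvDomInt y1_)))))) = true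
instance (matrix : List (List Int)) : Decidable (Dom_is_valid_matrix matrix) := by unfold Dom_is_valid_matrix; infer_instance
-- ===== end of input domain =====

-- B replaces A's guard-plus-comparison loop (early exit against the first row's length)
-- by collecting the set of distinct row lengths and testing that it has exactly one element (objective: simpler).

-- ===== PORT A =====
-- the 'for row in matrix: if len(row) != num_columns: return False' loop
def pvCheckRows (num_columns : Nat) : List (List Int) → Bool
  | [] => true
  | row :: rest => if row.length ≠ num_columns then false else pvCheckRows num_columns rest

def is_valid_matrix (matrix : List (List Int)) : Bool :=
  match matrix with
  | [] => false
  | r0 :: _ => pvCheckRows r0.length matrix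

-- ===== PORT B =====
def is_valid_matrix_alt (matrix : List (List Int)) : Bool :=
  (PySem.Set.ofList (matrix.map (fun row => row.length))).length == 1

-- ===== PRECONDITION & SPEC =====
def Spec_is_valid_matrix (matrix : List (List Int)) (out : Bool) : Prop := out = is_valid_matrix_alt matrix
instance (matrix : List (List Int)) (out : Bool) : Decidable (Spec_is_valid_matrix matrix out) := by unfold Spec_is_valid_matrix; infer_instance

-- ===== CLAIM (what is proved, stated in full; the proofs are below) =====
def Claim_equal_is_valid_matrix : Prop := ∀ (matrix : List (List Int)), Dom_is_valid_matrix matrix → Spec_is_valid_matrix matrix (is_valid_matrix matrix)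

-- ===== LEMMAS AND PROOFS =====

theorem pvCheckRows_iff (n : Nat) (l : List (List Int)) :
    pvCheckRows n l = true ↔ ∀ r ∈ l, r.length = n := by
  induction l with
  | nil => simp [pvCheckRows]
  | cons row rest ih =>
    simp only [pvCheckRows]
    by_cases h : row.length = n
    · simp [h, ih]
    · simp [h]

theorem length_le_foldl_add (l : List Nat) (s : PySem.Set Nat) :
    s.length ≤ (l.foldl PySem.Set.add s).length := by
  induction l generalizing s with
  | nil => simp
  | cons x l ih =>
    refine le_trans ?_ (ih (PySem.Set.add s x))
    simp only [PySem.Set.add]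
    split <;> simp

theorem foldl_add_singleton (l : List Nat) (n : Nat) :
    ((l.foldl PySem.Set.add [n]).length = 1) ↔ ∀ x ∈ l, x = n := by
  induction l with
  | nil => simp
  | cons x l ih =>
    by_cases h : x = n
    · subst h
      have : PySem.Set.add [x] x = [x] := by
        simp [PySem.Set.add, PySem.Set.contains]
      simp [List.foldl, ih]
    · have hadd : PySem.Set.add [n] x = [n, x] := by
        simp [PySem.Set.add, PySem.Set.contains, h]
      have hle := length_le_foldl_add l [n, x]
      simp only [List.foldl, hadd]
      constructor
      · intro hlen
        simp at hle
        omega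
      · intro hall
        exact absurd (hall x (by simp)) h

theorem is_valid_matrix_eq_alt (matrix : List (List Int)) :
    is_valid_matrix matrix = is_valid_matrix_alt matrix := by
  cases matrix with
  | nil => rfl
  | cons r0 rest =>
    have hof : PySem.Set.ofList ((r0 :: rest).map (fun row => row.length))
        = (rest.map (fun row => row.length)).foldl PySem.Set.add [r0.length] := by
      simp [PySem.Set.ofList_eq_foldl, List.foldl, PySem.Set.add]
    simp only [is_valid_matrix, is_valid_matrix_alt, hof]
    by_cases h : pvCheckRows r0.length (r0 :: rest) = true
    · have hall := (pvCheckRows_iff _ _).mp h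
      have : ∀ x ∈ rest.map (fun row => row.length), x = r0.length := by
        intro x hx
        rcases List.mem_map.mp hx with ⟨r, hr, rfl⟩
        exact hall r (by simp [hr])
      rw [h, ((foldl_add_singleton _ _).mpr this : _ = 1)]
      rfl
    · have hA : pvCheckRows r0.length (r0 :: rest) = false := by
        cases hc : pvCheckRows r0.length (r0 :: rest) <;> simp_all
      have : ¬ ∀ x ∈ rest.map (fun row => row.length), x = r0.length := by
        intro hall
        apply h
        apply (pvCheckRows_iff _ _).mpr
        intro r hr
        rcases List.mem_cons.mp hr with rfl | hr
        · rfl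
        · exact hall r.length (List.mem_map.mpr ⟨r, hr, rfl⟩)
      have hne : (rest.map (fun row => row.length) |>.foldl PySem.Set.add [r0.length]).length ≠ 1 :=
        fun hc => this ((foldl_add_singleton _ _).mp hc)
      rw [hA]
      exact (beq_eq_false_iff_ne.mpr hne).symm

-- ===== VERDICT (by name: the statement is the Claim_ definition above) =====
theorem is_valid_matrix_spec : Claim_equal_is_valid_matrix := by
  intro matrix _
  unfold Spec_is_valid_matrix
  exact is_valid_matrix_eq_alt matrix
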